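-- pv_equiv track=rewrite | github.com/jonas-programming/programming_language | Übungen/Python/Blatt 1/task1.py | it_sum
-- ===== SOURCE A (Python) =====
-- def it_sum(n):
--     """ Iterative sum to n """
--     if not isinstance(n, int):
--         return 0
--     sum_ = 0
--     for i in range(n+1):
--         sum_ += i
--     return sum_
--
--     """ Same would be:
--         sum(range(n+1)) """
-- ===== SOURCE B (Python) =====
-- def it_sum(n):
--     """ Closed-form sum 0..n (Gauss); 0 for non-int or negative n """
--     if not isinstance(n, int):
--         return 0
--     if n < 0:
--         return 0
--     return n * (n + 1) // 2
-- ===== Notes on version B (the rewrite author's own statement) =====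
-- stated objective: faster
-- what changed: Replaced the O(n) accumulation loop over the range with the Gauss closed-form product halved (returning zero for negative n).
import Mathlib
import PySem

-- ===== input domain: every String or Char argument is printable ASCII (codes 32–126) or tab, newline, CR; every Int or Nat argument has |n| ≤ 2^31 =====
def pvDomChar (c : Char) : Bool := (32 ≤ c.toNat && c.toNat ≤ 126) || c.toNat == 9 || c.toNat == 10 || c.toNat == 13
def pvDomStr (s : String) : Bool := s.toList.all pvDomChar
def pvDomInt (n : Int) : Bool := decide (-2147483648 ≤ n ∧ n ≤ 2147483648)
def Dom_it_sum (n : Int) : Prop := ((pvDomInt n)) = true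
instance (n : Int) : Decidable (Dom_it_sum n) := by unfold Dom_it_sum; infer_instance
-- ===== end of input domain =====

-- B replaces A's O(n) summation loop with the Gauss closed form (0 for negative n): asymptotically faster.
-- ===== PORT A =====
-- for i in range(n+1): sum_ += i  (bool-typed isinstance is always true for Int)
def it_sum (n : Int) : Int :=
  (PySem.List.pyRange 0 (n + 1) 1).foldl (fun sum_ i => sum_ + i) 0

-- ===== PORT B =====
-- Gauss closed form; 0 for negative n
def it_sum_alt (n : Int) : Int :=
  if n < 0 then 0 else PySem.Int.floordiv (n * (n + 1)) 2

-- ===== PRECONDITION & SPEC =====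
def Spec_it_sum (n : Int) (out : Int) : Prop := out = it_sum_alt n
instance (n : Int) (out : Int) : Decidable (Spec_it_sum n out) := by unfold Spec_it_sum; infer_instance

-- ===== CLAIM (what is proved, stated in full; the proofs are below) =====
def Claim_equal_it_sum : Prop := ∀ (n : Int), Dom_it_sum n → Spec_it_sum n (it_sum n)

-- ===== LEMMAS AND PROOFS =====

-- ===== VERDICT (by name: the statement is the Claim_ definition above) =====
theorem foldl_add_pyRange (m : Nat) :
    (PySem.List.pyRange 0 (m : Int) 1).foldl (fun sum_ i => sum_ + i) 0
      = (m : Int) * ((m : Int) - 1) / 2 := by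
  induction m with
  | zero => simp
  | succ k ih =>
    rw [show ((k + 1 : Nat) : Int) = (k : Int) + 1 by push_cast; ring,
        PySem.List.pyRange_one_succ_right (by positivity), List.foldl_append]
    simp only [List.foldl, ih]
    have h2 : ((k : Int) * ((k : Int) - 1)) % 2 = 0 :=
      Int.emod_eq_zero_of_dvd (Int.even_mul_pred_self (k : Int)).two_dvd
    have h3 : ((k : Int) + 1) * ((k : Int) + 1 - 1) = (k : Int) * ((k : Int) - 1) + 2 * k := by ring
    omega

theorem it_sum_spec : Claim_equal_it_sum := by
  intro n _
  unfold Spec_it_sum it_sum it_sum_alt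
  by_cases hn : n < 0
  · rw [PySem.List.pyRange_one_eq_nil (by omega)]
    simp [hn]
  · push Not at hn
    rw [if_neg (by omega)]
    obtain ⟨m, rfl⟩ := Int.eq_ofNat_of_zero_le hn
    rw [show ((m : Int) + 1) = ((m + 1 : Nat) : Int) by push_cast; ring,
        foldl_add_pyRange, PySem.Int.floordiv_eq_ediv_of_pos (by omega)]
    push_cast
    ring_nf
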